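-- pv_equiv track=rewrite | github.com/anupsharma555/PsychPaperEvalApp | scripts/download_models.py | pick_file
-- ===== SOURCE A (Python) =====
-- def pick_file(files: list[str], include: str, exclude: str | None = None) -> str:
--     include_lower = include.lower()
--     candidates = []
--     for name in files:
--         lower = name.lower()
--         if not lower.endswith(".gguf"):
--             continue
--         if include_lower not in lower:
--             continue
--         if exclude and exclude.lower() in lower:
--             continue
--         candidates.append(name)
--     if not candidates:
--         raise RuntimeError(f"No file found for pattern '{include}'")
--     return sorted(candidates)[0]
-- ===== SOURCE B (Python) =====
-- def pick_file(files: list[str], include: str, exclude: str | None = None) -> str: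
--     inc = include.lower()
--     exc = exclude.lower() if exclude else None
--     best = None
--     for name in files:
--         low = name.lower()
--         if not low.endswith(".gguf") or inc not in low:
--             continue
--         if exc is not None and exc in low:
--             continue
--         if best is None or name < best:
--             best = name
--     if best is None:
--         raise RuntimeError(f"No file found for pattern '{include}'")
--     return best
-- ===== Notes on version B (the rewrite author's own statement) =====
-- stated objective: simpler
-- what changed: Fuses filtering and selection into a single min-tracking scan (running best + lowered exclude computed once), eliminating the candidates list and the sort.
import Mathlib
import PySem

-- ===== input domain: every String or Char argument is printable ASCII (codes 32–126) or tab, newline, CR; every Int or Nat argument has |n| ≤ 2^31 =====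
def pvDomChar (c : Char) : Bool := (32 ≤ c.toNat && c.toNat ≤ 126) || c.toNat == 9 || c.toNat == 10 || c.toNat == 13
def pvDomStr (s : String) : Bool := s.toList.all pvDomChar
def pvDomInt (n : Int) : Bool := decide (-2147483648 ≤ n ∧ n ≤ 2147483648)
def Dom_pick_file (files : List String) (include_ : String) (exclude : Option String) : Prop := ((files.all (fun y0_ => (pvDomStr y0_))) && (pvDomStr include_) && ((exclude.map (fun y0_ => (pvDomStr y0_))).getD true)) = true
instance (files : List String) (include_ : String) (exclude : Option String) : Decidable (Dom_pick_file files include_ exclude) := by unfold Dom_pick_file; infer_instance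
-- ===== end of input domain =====

-- B fuses filtering and selection into one min-tracking scan (no candidates list, no sort); same result, simpler.

-- ===== PORT A =====
def pick_file (files : List String) (include_ : String) (exclude : Option String) : String :=
  let include_lower := PySem.Str.lower include_
  let candidates := files.foldl (fun acc name =>
    let lower := PySem.Str.lower name
    if !(PySem.Str.endswith lower ".gguf") then acc
    else if !(PySem.Str.isIn include_lower lower) then acc
    else if (match exclude with
             | none => false
             | some e => decide (e ≠ "") && PySem.Str.isIn (PySem.Str.lower e) lower) then acc
    else acc ++ [name]) []
  match PySem.List.sorted candidates (fun x => x) false with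
  | [] => ""   -- 'raise RuntimeError(...)': excluded by Pre_pick_file
  | m :: _ => m

-- ===== PORT B =====
def pick_file_alt (files : List String) (include_ : String) (exclude : Option String) : String :=
  let inc := PySem.Str.lower include_
  let exc : Option String := match exclude with
    | some e => if e ≠ "" then some (PySem.Str.lower e) else none
    | none => none
  let best := files.foldl (fun best name =>
    let low := PySem.Str.lower name
    if !(PySem.Str.endswith low ".gguf") || !(PySem.Str.isIn inc low) then best
    else if (match exc with | some e => PySem.Str.isIn e low | none => false) then best
    else match best with
      | none => some name
      | some b => if name < b then some name else some b) none
  match best with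
  | none => ""   -- 'raise RuntimeError(...)': excluded by Pre_pick_file
  | some b => b

-- ===== PRECONDITION & SPEC =====
-- the filter test both programs apply to a file name (used by Pre_ and the proofs)
def pvPass (include_ : String) (exclude : Option String) (name : String) : Bool :=
  PySem.Str.endswith (PySem.Str.lower name) ".gguf" &&
  PySem.Str.isIn (PySem.Str.lower include_) (PySem.Str.lower name) &&
  !(match exclude with
    | none => false
    | some e => decide (e ≠ "") && PySem.Str.isIn (PySem.Str.lower e) (PySem.Str.lower name))

-- Pre_ excludes exactly the inputs on which A raises RuntimeError (no file passes the filter).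
def Pre_pick_file (files : List String) (include_ : String) (exclude : Option String) : Prop :=
  ∃ name ∈ files, pvPass include_ exclude name = true
instance (files : List String) (include_ : String) (exclude : Option String) : Decidable (Pre_pick_file files include_ exclude) := by unfold Pre_pick_file; infer_instance

def pvWitness_pick_file : List String × String × Option String := (["model-q4.gguf"], "q4", some "q8")

def Spec_pick_file (files : List String) (include_ : String) (exclude : Option String) (out : String) : Prop := out = pick_file_alt files include_ exclude
instance (files : List String) (include_ : String) (exclude : Option String) (out : String) : Decidable (Spec_pick_file files include_ exclude out) := by unfold Spec_pick_file; infer_instance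

-- ===== CLAIM (what is proved, stated in full; the proofs are below) =====
def Claim_equal_pick_file : Prop := ∀ (files : List String) (include_ : String) (exclude : Option String), Dom_pick_file files include_ exclude → Pre_pick_file files include_ exclude → Spec_pick_file files include_ exclude (pick_file files include_ exclude)

-- ===== LEMMAS AND PROOFS =====

-- B's running-best update ('if best is None or name < best')
def pvMinUpd (o : Option String) (n : String) : Option String :=
  match o with
  | none => some n
  | some b => if n < b then some n else some b

-- A's accumulation loop is exactly 'filter pvPass'
theorem pick_file_candidates (files : List String) (include_ : String) (exclude : Option String) :
    files.foldl (fun acc name =>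
      let lower := PySem.Str.lower name
      if !(PySem.Str.endswith lower ".gguf") then acc
      else if !(PySem.Str.isIn (PySem.Str.lower include_) lower) then acc
      else if (match exclude with
               | none => false
               | some e => decide (e ≠ "") && PySem.Str.isIn (PySem.Str.lower e) lower) then acc
      else acc ++ [name]) [] = files.filter (pvPass include_ exclude) := by
  have hf : (fun (acc : List String) name =>
      let lower := PySem.Str.lower name
      if !(PySem.Str.endswith lower ".gguf") then acc
      else if !(PySem.Str.isIn (PySem.Str.lower include_) lower) then acc
      else if (match exclude with
               | none => false
               | some e => decide (e ≠ "") && PySem.Str.isIn (PySem.Str.lower e) lower) then acc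
      else acc ++ [name])
      = (fun acc name => if pvPass include_ exclude name then acc ++ [name] else acc) := by
    funext acc name
    simp only [pvPass]
    by_cases hE : PySem.Str.endswith (PySem.Str.lower name) ".gguf" = true <;>
      by_cases hI : PySem.Str.isIn (PySem.Str.lower include_) (PySem.Str.lower name) = true <;>
        cases exclude with
        | none => simp_all
        | some e =>
          by_cases he : e = "" <;>
            by_cases hX : PySem.Str.isIn (PySem.Str.lower e) (PySem.Str.lower name) = true <;>
              simp_all
  rw [hf, PySem.List.foldl_append_if_eq_filter]
  simp

-- B's loop body is 'if pvPass then pvMinUpd else skip'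
theorem pick_file_alt_step (include_ : String) (exclude : Option String) :
    (fun (best : Option String) name =>
      let low := PySem.Str.lower name
      if !(PySem.Str.endswith low ".gguf") || !(PySem.Str.isIn (PySem.Str.lower include_) low) then best
      else if (match (match exclude with
                      | some e => if e ≠ "" then some (PySem.Str.lower e) else none
                      | none => none) with
               | some e => PySem.Str.isIn e low | none => false) then best
      else match best with
        | none => some name
        | some b => if name < b then some name else some b)
    = (fun best name => if pvPass include_ exclude name then pvMinUpd best name else best) := by
  funext best name
  simp only [pvPass, pvMinUpd]
  by_cases hE : PySem.Str.endswith (PySem.Str.lower name) ".gguf" = true <;>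
    by_cases hI : PySem.Str.isIn (PySem.Str.lower include_) (PySem.Str.lower name) = true <;>
      cases exclude with
      | none => simp_all
      | some e =>
        by_cases he : e = "" <;>
          by_cases hX : PySem.Str.isIn (PySem.Str.lower e) (PySem.Str.lower name) = true <;>
            simp_all

-- guarded min-tracking fold = min-tracking fold over the filtered list
theorem minfold_filter (p : String → Bool) (l : List String) :
    ∀ (best : Option String),
      l.foldl (fun b n => if p n then pvMinUpd b n else b) best = (l.filter p).foldl pvMinUpd best := by
  induction l with
  | nil => intro best; rfl
  | cons x xs ih =>
    intro best
    by_cases hx : p x = true <;> simp [hx, ih]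

-- min-tracking fold from 'some b' is the running minimum
theorem minfold_some (l : List String) :
    ∀ (b : String), l.foldl pvMinUpd (some b) = some (l.foldl min b) := by
  induction l with
  | nil => intro b; rfl
  | cons x xs ih =>
    intro b
    have : pvMinUpd (some b) x = some (min b x) := by
      simp only [pvMinUpd, min_def]
      by_cases h : x < b
      · simp [h, (not_le.mpr h : ¬ b ≤ x)]
      · simp [h, (not_lt.mp h : b ≤ x)]
    simp [this, ih]

-- the running minimum is a member and a lower bound
theorem foldl_min_mem_le (l : List String) :
    ∀ (b : String), l.foldl min b ∈ b :: l ∧ ∀ y ∈ b :: l, l.foldl min b ≤ y := by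
  induction l with
  | nil => intro b; simp
  | cons x xs ih =>
    intro b
    obtain ⟨hmem, hle⟩ := ih (min b x)
    constructor
    · simp only [List.foldl_cons]
      rcases List.mem_cons.mp hmem with h | h
      · rcases min_choice b x with hc | hc <;> rw [h, hc] <;> simp
      · simp [h]
    · intro y hy
      simp only [List.foldl_cons]
      have hself : List.foldl min (min b x) xs ≤ min b x := hle _ List.mem_cons_self
      rcases List.mem_cons.mp hy with rfl | hy'
      · exact le_trans hself (min_le_left _ _)
      · rcases List.mem_cons.mp hy' with rfl | h
        · exact le_trans hself (min_le_right _ _)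
        · exact hle _ (List.mem_cons_of_mem _ h)

-- ===== VERDICT (by name: the statement is the Claim_ definition above) =====
theorem pick_file_spec : Claim_equal_pick_file := by
  intro files include_ exclude _ hpre
  obtain ⟨w, hwmem, hwpass⟩ := hpre
  unfold Spec_pick_file pick_file pick_file_alt
  simp only
  rw [pick_file_candidates, pick_file_alt_step, minfold_filter]
  have hwf : w ∈ files.filter (pvPass include_ exclude) := List.mem_filter.mpr ⟨hwmem, hwpass⟩
  cases hfl : files.filter (pvPass include_ exclude) with
  | nil => rw [hfl] at hwf; exact absurd hwf (List.not_mem_nil)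
  | cons h t =>
    rw [hfl] at hwf
    -- B's value: the running minimum of h :: t
    have hb : (h :: t).foldl pvMinUpd none = some (t.foldl min h) := by
      simp only [List.foldl_cons]
      have : pvMinUpd none h = some h := rfl
      rw [this, minfold_some]
    rw [hb]
    obtain ⟨hmmem, hmle⟩ := foldl_min_mem_le t h
    -- A's value: the head of the sorted candidates
    cases hs : PySem.List.sorted (h :: t) (fun x => x) false with
    | nil => exact absurd ((PySem.List.sorted_eq_nil_iff _ _ _).mp hs) (by simp)
    | cons m t' =>
      have hm_mem : m ∈ h :: t := by
        have := PySem.List.sorted_perm (h :: t) (fun x => x) false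
        rw [hs] at this
        exact this.mem_iff.mp (List.mem_cons_self)
      have hm_le : ∀ y ∈ h :: t, m ≤ y := by
        intro y hy
        exact PySem.List.key_head_sorted_le _ _ hs y hy
      exact le_antisymm (hm_le _ hmmem) (hmle _ hm_mem)
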